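-- pv_equiv track=rewrite | github.com/suUdong/crypto-trader | src/crypto_trader/risk/correlation_guard.py | get_symbol_exposure
-- ===== SOURCE A (Python) =====
-- def get_symbol_exposure(
--
--     wallets_with_positions: list[tuple[str, str]],
-- ) -> dict[str, list[str]]:
--     exposure: dict[str, list[str]] = {}
--     seen: dict[str, set[str]] = {}
--     for wallet_name, symbol in wallets_with_positions:
--         symbol_seen = seen.setdefault(symbol, set())
--         if wallet_name in symbol_seen:
--             continue
--         symbol_seen.add(wallet_name)
--         exposure.setdefault(symbol, []).append(wallet_name)
--     return exposure
-- ===== SOURCE B (Python) =====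
-- def get_symbol_exposure(
--     wallets_with_positions: list[tuple[str, str]],
-- ) -> dict[str, list[str]]:
--     exposure: dict[str, list[str]] = {}
--     for wallet_name, symbol in wallets_with_positions:
--         exposure.setdefault(symbol, []).append(wallet_name)
--     return {symbol: list(dict.fromkeys(wallets)) for symbol, wallets in exposure.items()}
-- ===== Notes on version B (the rewrite author's own statement) =====
-- stated objective: simpler
-- what changed: Replaces the single guarded pass with a per-symbol 'seen' set by a build-then-dedup two-pass structure: first group all wallets (duplicates kept) with setdefault/append, then dedup each symbol's list with dict.fromkeys preserving first-seen order.
import Mathlib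
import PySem

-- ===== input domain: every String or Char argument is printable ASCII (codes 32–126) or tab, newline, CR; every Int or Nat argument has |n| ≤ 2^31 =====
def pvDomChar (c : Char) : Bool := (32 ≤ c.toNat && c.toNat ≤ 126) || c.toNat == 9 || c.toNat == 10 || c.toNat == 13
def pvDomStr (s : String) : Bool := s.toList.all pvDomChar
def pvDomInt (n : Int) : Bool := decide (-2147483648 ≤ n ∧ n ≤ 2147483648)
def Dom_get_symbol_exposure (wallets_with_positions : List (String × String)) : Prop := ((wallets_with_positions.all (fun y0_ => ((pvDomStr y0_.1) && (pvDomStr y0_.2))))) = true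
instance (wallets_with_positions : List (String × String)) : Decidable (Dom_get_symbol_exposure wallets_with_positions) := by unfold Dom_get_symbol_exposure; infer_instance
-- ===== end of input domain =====

-- B replaces A's single guarded pass (per-symbol `seen` sets) by a build-then-dedup two-pass
-- structure (group everything, then dedup each list, first occurrences kept): simpler decomposition.


-- ===== PORT A =====
-- loop body of A; `symbol_seen.add(wallet_name)` mutates the set stored in `seen`, modelled by
-- re-inserting the grown set; `exposure.setdefault(symbol, []).append(w)` = modify with default [].
def pvStepA (st : PySem.Dict String (List String) × PySem.Dict String (PySem.Set String))
    (wp : String × String) :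
    PySem.Dict String (List String) × PySem.Dict String (PySem.Set String) :=
  let seen := st.2.setdefault wp.2 PySem.Set.empty
  let symbol_seen := seen.getD wp.2 PySem.Set.empty
  if PySem.Set.contains symbol_seen wp.1 then (st.1, seen)
  else (st.1.modify wp.2 [] (fun ws => ws ++ [wp.1]),
        seen.insert wp.2 (PySem.Set.add symbol_seen wp.1))

def get_symbol_exposure (wallets_with_positions : List (String × String)) : List (String × List String) :=
  (wallets_with_positions.foldl pvStepA (PySem.Dict.empty, PySem.Dict.empty)).1.items

-- ===== PORT B =====
-- first pass of B: exposure.setdefault(symbol, []).append(wallet_name), duplicates kept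
def pvStepB (exposure : PySem.Dict String (List String)) (wp : String × String) :
    PySem.Dict String (List String) :=
  exposure.modify wp.2 [] (fun ws => ws ++ [wp.1])

def get_symbol_exposure_alt (wallets_with_positions : List (String × String)) : List (String × List String) :=
  -- second pass: {symbol: list(dict.fromkeys(wallets)) …}; dict.fromkeys dedup = PySem.List.dedup
  (wallets_with_positions.foldl pvStepB PySem.Dict.empty).items.map
    (fun q => (q.1, PySem.List.dedup q.2))

-- ===== PRECONDITION & SPEC =====
def Spec_get_symbol_exposure (wallets_with_positions : List (String × String)) (out : List (String × List String)) : Prop := out = get_symbol_exposure_alt wallets_with_positions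
instance (wallets_with_positions : List (String × String)) (out : List (String × List String)) : Decidable (Spec_get_symbol_exposure wallets_with_positions out) := by unfold Spec_get_symbol_exposure; infer_instance

-- ===== CLAIM (what is proved, stated in full; the proofs are below) =====
def Claim_equal_get_symbol_exposure : Prop := ∀ (wallets_with_positions : List (String × String)), Dom_get_symbol_exposure wallets_with_positions → Spec_get_symbol_exposure wallets_with_positions (get_symbol_exposure wallets_with_positions)

-- ===== LEMMAS AND PROOFS =====

-- the dict with every value list deduped (B's second pass, as a Dict)
def pvMapVal (d : PySem.Dict String (List String)) : PySem.Dict String (List String) :=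
  PySem.Dict.mk (d.items.map (fun p => (p.1, PySem.List.dedup p.2)))

theorem pv_keys_mapVal (d : PySem.Dict String (List String)) : (pvMapVal d).keys = d.keys := by
  simp [pvMapVal, PySem.Dict.keys]

theorem pv_contains_mapVal (d : PySem.Dict String (List String)) (k : String) :
    (pvMapVal d).contains k = d.contains k := by
  simp [pvMapVal, PySem.Dict.contains, List.any_map, Function.comp_def]

theorem pv_get?_mk_map (l : List (String × List String)) (k : String) :
    (PySem.Dict.mk (l.map (fun p => (p.1, PySem.List.dedup p.2)))).get? k
      = ((PySem.Dict.mk l).get? k).map PySem.List.dedup := by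
  induction l with
  | nil => simp [PySem.Dict.get?]
  | cons p rest ih =>
    simp only [List.map_cons]
    rw [PySem.Dict.get?_mk_cons, PySem.Dict.get?_mk_cons]
    by_cases h : (p.1 == k) = true
    · simp [h]
    · simp only [h]
      exact ih

theorem pv_get?_mapVal (d : PySem.Dict String (List String)) (k : String) :
    (pvMapVal d).get? k = (d.get? k).map PySem.List.dedup := by
  simpa [pvMapVal] using pv_get?_mk_map d.items k

theorem pv_getD_mapVal (d : PySem.Dict String (List String)) (k : String) :
    (pvMapVal d).getD k [] = PySem.List.dedup (d.getD k []) := by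
  rw [PySem.Dict.getD_eq_get?_getD, PySem.Dict.getD_eq_get?_getD, pv_get?_mapVal]
  cases d.get? k <;> simp [PySem.List.dedup, PySem.Set.ofList]

theorem pv_mapVal_insert (d : PySem.Dict String (List String)) (k : String) (v : List String) :
    pvMapVal (d.insert k v) = (pvMapVal d).insert k (PySem.List.dedup v) := by
  apply PySem.Dict.ext
  have hL : (pvMapVal (d.insert k v)).items = (d.insert k v).items.map
      (fun p => (p.1, PySem.List.dedup p.2)) := rfl
  have hR : ((pvMapVal d).insert k (PySem.List.dedup v)).items
      = if (pvMapVal d).contains k = true then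
          (pvMapVal d).items.map (fun p => if (p.1 == k) = true then (k, PySem.List.dedup v) else p)
        else (pvMapVal d).items ++ [(k, PySem.List.dedup v)] := PySem.Dict.items_insert _ _ _
  rw [hL, hR, PySem.Dict.items_insert, pv_contains_mapVal]
  by_cases hc : d.contains k = true
  · simp only [hc, if_true, pvMapVal, List.map_map]
    apply List.map_congr_left
    intro p _
    by_cases hk : p.1 = k <;> simp [hk]
  · simp only [hc, if_false, Bool.false_eq_true, pvMapVal, List.map_append, List.map_cons,
      List.map_nil]

theorem pv_insert_self (d : PySem.Dict String (List String)) (k : String) (v : List String)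
    (hnd : d.keys.Nodup) (h : d.get? k = some v) : d.insert k v = d := by
  apply PySem.Dict.ext
  have hmem : (k, v) ∈ d.items := PySem.Dict.mem_items_of_get?_eq_some d h
  have hc : d.contains k = true :=
    (PySem.Dict.contains_iff_mem_keys d k).mpr (PySem.Dict.mem_keys_of_mem_items d hmem)
  rw [PySem.Dict.items_insert, if_pos hc]
  conv_rhs => rw [← List.map_id d.items]
  apply List.map_congr_left
  intro p hp
  by_cases hk : (p.1 == k) = true
  · have hk' : p.1 = k := by simpa using hk
    have h1 : d.get? p.1 = some p.2 := PySem.Dict.get?_of_mem_items d hp hnd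
    rw [hk', h] at h1
    obtain ⟨p1, p2⟩ := p
    simp only at hk' h1
    simp [hk', (Option.some_injective _ h1).symm]
  · simp [hk]

theorem pv_dedup_append_mem (v : List String) (w : String) (hw : w ∈ v) :
    PySem.List.dedup (v ++ [w]) = PySem.List.dedup v := by
  rw [PySem.List.dedup_eq_ofList, PySem.List.dedup_eq_ofList, PySem.Set.ofList_append,
    PySem.Set.update_cons, PySem.Set.update_nil, PySem.Set.add]
  have hmem : w ∈ PySem.Set.ofList v := by
    rw [← PySem.List.dedup_eq_ofList]
    exact (PySem.List.mem_dedup v w).mpr hw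
  simp [PySem.Set.contains, hmem]

theorem pv_dedup_append_not_mem (v : List String) (w : String) (hw : ¬ w ∈ v) :
    PySem.List.dedup (v ++ [w]) = PySem.List.dedup v ++ [w] := by
  rw [PySem.List.dedup_eq_ofList, PySem.List.dedup_eq_ofList, PySem.Set.ofList_append,
    PySem.Set.update_cons, PySem.Set.update_nil, PySem.Set.add]
  have hmem : w ∉ PySem.Set.ofList v := by
    rw [← PySem.List.dedup_eq_ofList]
    exact fun h => hw ((PySem.List.mem_dedup v w).mp h)
  simp [PySem.Set.contains, hmem]

theorem pv_contains_dedup (v : List String) (w : String) :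
    PySem.Set.contains (PySem.List.dedup v) w = decide (w ∈ v) := by
  simp [PySem.Set.contains]

-- one step of A on the related state equals the deduped image of one step of B
theorem pv_step (d : PySem.Dict String (List String)) (hnd : d.keys.Nodup) (wp : String × String) :
    pvStepA (pvMapVal d, pvMapVal d) wp = (pvMapVal (pvStepB d wp), pvMapVal (pvStepB d wp)) := by
  obtain ⟨w, sym⟩ := wp
  have hB : pvStepB d (w, sym) = d.insert sym (d.getD sym [] ++ [w]) := rfl
  by_cases hc : d.contains sym = true
  · have hsd : (pvMapVal d).setdefault sym PySem.Set.empty = pvMapVal d :=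
      PySem.Dict.setdefault_of_contains _ _ (by rw [pv_contains_mapVal]; exact hc)
    obtain ⟨v, hv⟩ : ∃ v, d.get? sym = some v := by
      cases h : d.get? sym with
      | none => rw [PySem.Dict.get?_eq_none_iff_contains] at h; simp [hc] at h
      | some v => exact ⟨v, rfl⟩
    have hvD : d.getD sym [] = v := PySem.Dict.getD_of_get?_eq_some d [] hv
    have hget : (pvMapVal d).getD sym PySem.Set.empty = PySem.List.dedup v := by
      show (pvMapVal d).getD sym [] = _
      rw [pv_getD_mapVal, hvD]
    by_cases hw : w ∈ v
    · have htest : PySem.Set.contains ((pvMapVal d).getD sym PySem.Set.empty) w = true := by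
        rw [hget, pv_contains_dedup]
        simpa using hw
      have hmv : pvMapVal (pvStepB d (w, sym)) = pvMapVal d := by
        rw [hB, pv_mapVal_insert, hvD, pv_dedup_append_mem v w hw]
        exact pv_insert_self _ _ _ (by rw [pv_keys_mapVal]; exact hnd)
          (by rw [pv_get?_mapVal, hv]; rfl)
      show (if PySem.Set.contains (((pvMapVal d).setdefault sym PySem.Set.empty).getD sym
              PySem.Set.empty) w = true
            then (pvMapVal d, (pvMapVal d).setdefault sym PySem.Set.empty)
            else ((pvMapVal d).modify sym [] (fun ws => ws ++ [w]),
              ((pvMapVal d).setdefault sym PySem.Set.empty).insert sym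
                (PySem.Set.add (((pvMapVal d).setdefault sym PySem.Set.empty).getD sym
                  PySem.Set.empty) w)))
          = (pvMapVal (pvStepB d (w, sym)), pvMapVal (pvStepB d (w, sym)))
      rw [hsd, htest, hmv, if_pos rfl]
    · have htest : PySem.Set.contains ((pvMapVal d).getD sym PySem.Set.empty) w = false := by
        rw [hget, pv_contains_dedup]
        simpa using hw
      have hadd : PySem.Set.add ((pvMapVal d).getD sym PySem.Set.empty) w
          = PySem.List.dedup v ++ [w] := by
        rw [PySem.Set.add]
        simp only [htest, Bool.false_eq_true, if_false]
        rw [hget]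
      have hmod : (pvMapVal d).modify sym [] (fun ws => ws ++ [w])
          = (pvMapVal d).insert sym (PySem.List.dedup v ++ [w]) := by
        show (pvMapVal d).insert sym ((pvMapVal d).getD sym [] ++ [w]) = _
        rw [pv_getD_mapVal, hvD]
      have hmv : pvMapVal (pvStepB d (w, sym))
          = (pvMapVal d).insert sym (PySem.List.dedup v ++ [w]) := by
        rw [hB, pv_mapVal_insert, hvD, pv_dedup_append_not_mem v w hw]
      show (if PySem.Set.contains (((pvMapVal d).setdefault sym PySem.Set.empty).getD sym
              PySem.Set.empty) w = true
            then (pvMapVal d, (pvMapVal d).setdefault sym PySem.Set.empty)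
            else ((pvMapVal d).modify sym [] (fun ws => ws ++ [w]),
              ((pvMapVal d).setdefault sym PySem.Set.empty).insert sym
                (PySem.Set.add (((pvMapVal d).setdefault sym PySem.Set.empty).getD sym
                  PySem.Set.empty) w)))
          = (pvMapVal (pvStepB d (w, sym)), pvMapVal (pvStepB d (w, sym)))
      rw [hsd]
      simp only [htest, Bool.false_eq_true, if_false]
      rw [hadd, hmod, hmv]
  · have hc' : d.contains sym = false := by simpa using hc
    have hcm : (pvMapVal d).contains sym = false := by rw [pv_contains_mapVal]; exact hc'
    have hsd : (pvMapVal d).setdefault sym PySem.Set.empty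
        = (pvMapVal d).insert sym PySem.Set.empty :=
      PySem.Dict.setdefault_of_not_contains _ _ hcm
    have hget : ((pvMapVal d).insert sym (PySem.Set.empty : PySem.Set String)).getD sym
        PySem.Set.empty = PySem.Set.empty := by
      rw [PySem.Dict.getD_eq_get?_getD, PySem.Dict.get?_insert_self]
      rfl
    have hvD : d.getD sym [] = [] := PySem.Dict.getD_of_not_contains d [] hc'
    have hmod : (pvMapVal d).modify sym [] (fun ws => ws ++ [w])
        = (pvMapVal d).insert sym [w] := by
      show (pvMapVal d).insert sym ((pvMapVal d).getD sym [] ++ [w]) = _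
      rw [pv_getD_mapVal, hvD]
      rfl
    have hmv : pvMapVal (pvStepB d (w, sym)) = (pvMapVal d).insert sym [w] := by
      rw [hB, pv_mapVal_insert, hvD]
      rfl
    show (if PySem.Set.contains (((pvMapVal d).setdefault sym PySem.Set.empty).getD sym
            PySem.Set.empty) w = true
          then (pvMapVal d, (pvMapVal d).setdefault sym PySem.Set.empty)
          else ((pvMapVal d).modify sym [] (fun ws => ws ++ [w]),
            ((pvMapVal d).setdefault sym PySem.Set.empty).insert sym
              (PySem.Set.add (((pvMapVal d).setdefault sym PySem.Set.empty).getD sym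
                PySem.Set.empty) w)))
        = (pvMapVal (pvStepB d (w, sym)), pvMapVal (pvStepB d (w, sym)))
    rw [hsd, hget, hmod, hmv]
    have hce : PySem.Set.contains (PySem.Set.empty : PySem.Set String) w = false := rfl
    simp only [hce, Bool.false_eq_true, if_false]
    rw [PySem.Dict.insert_insert_self]
    rfl

theorem pv_nodup_stepB (d : PySem.Dict String (List String)) (hnd : d.keys.Nodup)
    (wp : String × String) : (pvStepB d wp).keys.Nodup := by
  obtain ⟨w, sym⟩ := wp
  have hB : pvStepB d (w, sym) = d.insert sym (d.getD sym [] ++ [w]) := rfl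
  rw [hB]
  by_cases hc : d.contains sym = true
  · rw [PySem.Dict.keys_insert_of_contains d _ hc]; exact hnd
  · have hc' : d.contains sym = false := by simpa using hc
    rw [PySem.Dict.keys_insert_of_not_contains d _ hc']
    refine List.Nodup.append hnd (List.nodup_singleton _) ?_
    intro y hy
    simp only [List.mem_singleton]
    rintro rfl
    exact absurd ((PySem.Dict.contains_iff_mem_keys d y).mpr hy) (by simp [hc'])

theorem pv_main (l : List (String × String)) (d : PySem.Dict String (List String))
    (hnd : d.keys.Nodup) :
    l.foldl pvStepA (pvMapVal d, pvMapVal d)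
      = (pvMapVal (l.foldl pvStepB d), pvMapVal (l.foldl pvStepB d)) := by
  induction l generalizing d with
  | nil => rfl
  | cons wp rest ih =>
    simp only [List.foldl_cons]
    rw [pv_step d hnd wp]
    exact ih (pvStepB d wp) (pv_nodup_stepB d hnd wp)

-- ===== VERDICT (by name: the statement is the Claim_ definition above) =====
theorem get_symbol_exposure_spec : Claim_equal_get_symbol_exposure := by
  intro l _
  show get_symbol_exposure l = get_symbol_exposure_alt l
  unfold get_symbol_exposure get_symbol_exposure_alt
  have h0 : ((PySem.Dict.empty : PySem.Dict String (List String)),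
      (PySem.Dict.empty : PySem.Dict String (PySem.Set String)))
      = (pvMapVal PySem.Dict.empty, pvMapVal PySem.Dict.empty) := rfl
  rw [h0, pv_main l PySem.Dict.empty PySem.Dict.nodup_keys_empty]
  rfl
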